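-- pv_equiv track=rewrite | github.com/abe16s/A2SV-In-Person-Competitive-Programming | 16-Jan-2025/Bitwise XOR of All Pairings 225513.py | xorAllNums
-- ===== SOURCE A (Python) =====
-- from typing import List
--
-- def xorAllNums(nums1: List[int], nums2: List[int]) -> int:
--     m, n = len(nums1), len(nums2)
--     ans = 0
--     if n % 2:
--         for i in range(m):
--             ans ^= nums1[i]
--     if m % 2:
--         for j in range(n):
--             ans ^= nums2[j]
--     return ans
-- ===== SOURCE B (Python) =====
-- from typing import List
--
-- def xorAllNums(nums1: List[int], nums2: List[int]) -> int:
--     m, n = len(nums1), len(nums2)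
--     mult = {}
--     for x in nums1:
--         mult[x] = mult.get(x, 0) + n
--     for y in nums2:
--         mult[y] = mult.get(y, 0) + m
--     ans = 0
--     for v, c in mult.items():
--         if c % 2:
--             ans ^= v
--     return ans
-- ===== Notes on version B (the rewrite author's own statement) =====
-- stated objective: alternative
-- what changed: B computes, in a dict, each value's total multiplicity among the m*n pairings (each nums1 element occurs len(nums2) times and vice versa) and XORs the values with odd multiplicity, instead of A's parity-gated loops over the two arrays.
import Mathlib
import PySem

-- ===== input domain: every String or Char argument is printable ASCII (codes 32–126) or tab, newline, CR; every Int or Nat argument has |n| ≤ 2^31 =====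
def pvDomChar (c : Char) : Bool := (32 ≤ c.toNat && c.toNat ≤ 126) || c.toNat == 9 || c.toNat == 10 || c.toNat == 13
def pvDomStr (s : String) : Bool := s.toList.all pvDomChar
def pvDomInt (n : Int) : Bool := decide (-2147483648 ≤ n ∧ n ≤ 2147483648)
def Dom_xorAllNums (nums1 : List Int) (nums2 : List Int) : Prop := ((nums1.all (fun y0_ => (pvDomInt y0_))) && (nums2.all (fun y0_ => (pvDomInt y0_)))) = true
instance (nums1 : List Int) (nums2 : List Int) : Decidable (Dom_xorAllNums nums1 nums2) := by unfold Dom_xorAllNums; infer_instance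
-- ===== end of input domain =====

-- B replaces A's parity-gated loops by a multiplicity dict: each value's total count among
-- all m*n pairings is tallied and the values with odd multiplicity are XORed (alternative
-- algorithm, same O(m+n) cost).

-- ===== PORT A =====
def xorAllNums (nums1 : List Int) (nums2 : List Int) : Int :=
  let m : Int := nums1.length
  let n : Int := nums2.length
  let ans : Int :=
    if PySem.Int.mod n 2 ≠ 0 then
      (PySem.List.pyRange 0 m 1).foldl (fun acc i => PySem.Int.bxor acc (PySem.List.pyGetD nums1 i 0)) 0
    else 0
  if PySem.Int.mod m 2 ≠ 0 then
    (PySem.List.pyRange 0 n 1).foldl (fun acc j => PySem.Int.bxor acc (PySem.List.pyGetD nums2 j 0)) ans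
  else ans

-- ===== PORT B =====
def xorAllNums_alt (nums1 : List Int) (nums2 : List Int) : Int :=
  let m : Int := nums1.length
  let n : Int := nums2.length
  let d1 := nums1.foldl (fun d x => d.insert x (d.getD x 0 + n)) (PySem.Dict.empty : PySem.Dict Int Int)
  let d2 := nums2.foldl (fun d y => d.insert y (d.getD y 0 + m)) d1
  d2.items.foldl (fun ans p => if PySem.Int.mod p.2 2 ≠ 0 then PySem.Int.bxor ans p.1 else ans) 0

-- ===== PRECONDITION & SPEC =====
def Spec_xorAllNums (nums1 : List Int) (nums2 : List Int) (out : Int) : Prop := out = xorAllNums_alt nums1 nums2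
instance (nums1 : List Int) (nums2 : List Int) (out : Int) : Decidable (Spec_xorAllNums nums1 nums2 out) := by unfold Spec_xorAllNums; infer_instance

-- ===== CLAIM (what is proved, stated in full; the proofs are below) =====
def Claim_equal_xorAllNums : Prop := ∀ (nums1 : List Int) (nums2 : List Int), Dom_xorAllNums nums1 nums2 → Spec_xorAllNums nums1 nums2 (xorAllNums nums1 nums2)

-- ===== LEMMAS AND PROOFS =====

-- sign bit / magnitude decomposition of Python's infinite two's-complement ints
def pvSgn (a : Int) : Bool := decide (a < 0)
def pvMag (a : Int) : Nat := if 0 ≤ a then a.toNat else (-a - 1).toNat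
def pvPack (s : Bool) (n : Nat) : Int := if s then -(n : Int) - 1 else n

theorem pv_bxor_eq (a b : Int) :
    PySem.Int.bxor a b = pvPack (xor (pvSgn a) (pvSgn b)) (pvMag a ^^^ pvMag b) := by
  unfold PySem.Int.bxor pvPack pvSgn pvMag
  split_ifs <;> simp_all <;> omega

theorem pv_sgn_pack (s : Bool) (n : Nat) : pvSgn (pvPack s n) = s := by
  cases s <;> simp [pvSgn, pvPack] <;> omega

theorem pv_mag_pack (s : Bool) (n : Nat) : pvMag (pvPack s n) = n := by
  cases s <;> simp [pvMag, pvPack] <;> omega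

theorem pv_bxor_assoc (a b c : Int) :
    PySem.Int.bxor (PySem.Int.bxor a b) c = PySem.Int.bxor a (PySem.Int.bxor b c) := by
  simp [pv_bxor_eq, pv_sgn_pack, pv_mag_pack, Nat.xor_assoc]

theorem pv_zero_bxor (a : Int) : PySem.Int.bxor 0 a = a := by
  rw [PySem.Int.bxor_comm]; exact PySem.Int.bxor_zero a

theorem pv_bxor_self (a : Int) : PySem.Int.bxor a a = 0 := by
  simp

theorem pv_bxor_cancel (a x : Int) : PySem.Int.bxor (PySem.Int.bxor a x) x = a := by
  rw [pv_bxor_assoc, pv_bxor_self, PySem.Int.bxor_zero]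

theorem pv_foldl_range (xs : List Int) (init : Int) :
    (PySem.List.pyRange 0 (xs.length : Int) 1).foldl
      (fun acc i => PySem.Int.bxor acc (PySem.List.pyGetD xs i 0)) init
    = xs.foldl PySem.Int.bxor init :=
  PySem.List.foldl_pyRange_zero_pyGetD' xs 0 PySem.Int.bxor init

theorem pv_foldl_bxor_init (xs : List Int) (init : Int) :
    xs.foldl PySem.Int.bxor init = PySem.Int.bxor init (xs.foldl PySem.Int.bxor 0) := by
  induction xs generalizing init with
  | nil => simp [PySem.Int.bxor_zero]
  | cons x xs ih =>
    rw [List.foldl_cons, List.foldl_cons, ih (PySem.Int.bxor init x),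
      ih (PySem.Int.bxor 0 x), pv_zero_bxor, pv_bxor_assoc]

-- the body of B's final loop, and the loop itself, as named functions for the lemmas
def pvStep (a : Int) (p : Int × Int) : Int :=
  if PySem.Int.mod p.2 2 ≠ 0 then PySem.Int.bxor a p.1 else a

def pvG (l : List (Int × Int)) (init : Int) : Int := l.foldl pvStep init

theorem pvG_append (l1 l2 : List (Int × Int)) (init : Int) :
    pvG (l1 ++ l2) init = pvG l2 (pvG l1 init) := List.foldl_append ..

theorem pvStep_bxor (i x : Int) (p : Int × Int) :
    pvStep (PySem.Int.bxor i x) p = PySem.Int.bxor (pvStep i p) x := by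
  unfold pvStep
  split_ifs with h
  · rw [pv_bxor_assoc, pv_bxor_assoc, PySem.Int.bxor_comm x p.1]
  · rfl

theorem pvG_init (l : List (Int × Int)) (i x : Int) :
    pvG l (PySem.Int.bxor i x) = PySem.Int.bxor (pvG l i) x := by
  induction l generalizing i with
  | nil => rfl
  | cons p t ih => rw [pvG, List.foldl_cons, pvStep_bxor, ← pvG, ih]; rfl

theorem pv_map_replace_id (l : List (Int × Int)) (x v : Int)
    (h : x ∉ l.map Prod.fst) :
    l.map (fun q => if q.1 == x then (x, v) else q) = l := by
  induction l with
  | nil => rfl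
  | cons q t ih =>
    have hq : (q.1 == x) = false := by
      have : q.1 ≠ x := by intro e; exact h (by simp [← e])
      simpa using this
    have h' : x ∉ t.map Prod.fst := by intro hx; exact h (by simp [hx])
    simp only [List.map_cons, hq, Bool.false_eq_true, if_false, ih h']

theorem pv_mod2 (a : Int) : PySem.Int.mod a 2 = a % 2 :=
  PySem.Int.mod_eq_emod_of_pos (by norm_num)

theorem pvG_insert (d : PySem.Dict Int Int) (x k init : Int) (hnd : d.keys.Nodup) :
    pvG (d.insert x (d.getD x 0 + k)).items init
      = if PySem.Int.mod k 2 ≠ 0 then PySem.Int.bxor (pvG d.items init) x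
        else pvG d.items init := by
  by_cases hc : d.contains x
  · -- key present: the entry is replaced in place
    have hndK : d.keys.Nodup := hnd
    have hx : x ∈ d.items.map Prod.fst := by
      have := (PySem.Dict.contains_iff_mem_keys (d := d) (k := x)).mp hc
      simpa [PySem.Dict.keys] using this
    obtain ⟨p, hp, hpx⟩ := List.mem_map.mp hx
    obtain ⟨l1, l2, hdec⟩ := List.append_of_mem hp
    have hkeys : d.keys = l1.map Prod.fst ++ p.1 :: l2.map Prod.fst := by
      simp [PySem.Dict.keys, hdec]
    rw [hkeys] at hnd
    obtain ⟨nd1, nd2, hsep⟩ := List.nodup_append.mp hnd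
    have hx1 : x ∉ l1.map Prod.fst := fun hm => (hsep x hm p.1 (by simp)) hpx.symm
    have hx2 : x ∉ l2.map Prod.fst := fun hm => ((List.pairwise_cons.mp nd2).1 x hm) hpx
    have hpform : p = (x, p.2) := by rw [← hpx]
    have hgd : d.getD x 0 = p.2 := by
      apply PySem.Dict.getD_of_mem_items
      · exact hpform ▸ hp
      · exact hndK
    have hitems : (d.insert x (d.getD x 0 + k)).items = l1 ++ (x, p.2 + k) :: l2 := by
      rw [PySem.Dict.items_insert_of_contains _ _ hc, hgd, hdec, List.map_append, List.map_cons,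
        pv_map_replace_id _ _ _ hx1, pv_map_replace_id _ _ _ hx2]
      simp [hpx]
    rw [hitems, hdec, hpform, pvG_append, pvG_append,
      show ∀ i, pvG ((x, p.2 + k) :: l2) i
          = pvG l2 (if PySem.Int.mod (p.2 + k) 2 ≠ 0 then PySem.Int.bxor i x else i) from
        fun _ => rfl,
      show ∀ i, pvG ((x, p.2) :: l2) i
          = pvG l2 (if PySem.Int.mod p.2 2 ≠ 0 then PySem.Int.bxor i x else i) from
        fun _ => rfl]
    simp only [pv_mod2]
    by_cases hck : p.2 % 2 = 0 <;> by_cases hkk : k % 2 = 0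
    · rw [if_neg (by omega), if_neg (by omega), if_neg (by omega)]
    · rw [if_pos (by omega), if_pos (by omega), if_neg (by omega), pvG_init]
    · rw [if_pos (by omega), if_neg (by omega), if_pos (by omega)]
    · rw [if_neg (by omega), if_pos (by omega), if_pos (by omega), pvG_init, pv_bxor_cancel]
  · -- fresh key: appended at the end
    have hcf : d.contains x = false := by simpa using hc
    rw [PySem.Dict.items_insert_of_not_contains _ _ hcf,
      PySem.Dict.getD_of_not_contains _ 0 hcf, zero_add, pvG_append,
      show ∀ i, pvG [(x, k)] i
          = if PySem.Int.mod k 2 ≠ 0 then PySem.Int.bxor i x else i from fun _ => rfl]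

theorem pvG_loop (xs : List Int) (k : Int) (d : PySem.Dict Int Int) (init : Int)
    (hnd : d.keys.Nodup) :
    pvG ((xs.foldl (fun d x => d.insert x (d.getD x 0 + k)) d).items) init
      = if PySem.Int.mod k 2 ≠ 0 then
          PySem.Int.bxor (pvG d.items init) (xs.foldl PySem.Int.bxor 0)
        else pvG d.items init := by
  induction xs generalizing d with
  | nil =>
    split_ifs
    · rw [List.foldl_nil, List.foldl_nil, PySem.Int.bxor_zero]
    · rfl
  | cons x xs ih =>
    have hnd' : (d.insert x (d.getD x 0 + k)).keys.Nodup := by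
      apply PySem.Dict.nodup_keys_insert
      exact hnd
    rw [List.foldl_cons, ih _ hnd', pvG_insert _ _ _ _ hnd, List.foldl_cons,
      pv_foldl_bxor_init xs (PySem.Int.bxor 0 x), pv_zero_bxor]
    split_ifs
    · rw [pv_bxor_assoc]
    · rfl

-- ===== VERDICT (by name: the statement is the Claim_ definition above) =====
theorem xorAllNums_spec : Claim_equal_xorAllNums := by
  intro nums1 nums2 _
  unfold Spec_xorAllNums
  have hnd1 : ((nums1.foldl
      (fun d x => d.insert x (d.getD x 0 + (nums2.length : Int)))
      (PySem.Dict.empty : PySem.Dict Int Int)).keys).Nodup := by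
    apply PySem.Dict.nodup_keys_foldl_insert
    exact PySem.Dict.nodup_keys_empty
  have hB : xorAllNums_alt nums1 nums2
      = pvG ((nums2.foldl
              (fun d y => d.insert y (d.getD y 0 + (nums1.length : Int)))
              (nums1.foldl
                (fun d x => d.insert x (d.getD x 0 + (nums2.length : Int)))
                (PySem.Dict.empty : PySem.Dict Int Int))).items) 0 := rfl
  rw [hB, pvG_loop _ _ _ _ hnd1, pvG_loop _ _ _ _ PySem.Dict.nodup_keys_empty]
  simp only [xorAllNums, pv_foldl_range]
  have hG0 : pvG (PySem.Dict.empty : PySem.Dict Int Int).items 0 = 0 := rfl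
  rw [hG0]
  split_ifs with h1 h2 h2
  · rw [pv_foldl_bxor_init nums2, pv_zero_bxor]
  · rw [pv_zero_bxor]
  · rw [pv_zero_bxor]
  · rfl
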